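-- pv_equiv track=rewrite | github.com/dvoryankin/dmtvtr-bot | handlers/quiz.py | _calc_results
-- ===== SOURCE A (Python) =====
-- SPECS = [
--     ("backend", "Backend-разработка", "Серверная логика, API, базы данных."),
--     ("frontend", "Frontend-разработка", "Интерфейсы, анимации, UX."),
--     ("devops", "DevOps / SRE", "CI/CD, мониторинг, автоматизация."),
--     ("datascience", "Data Science / ML", "Модели, эксперименты, инсайты из данных."),
--     ("security", "Инфобезопасность", "Защита систем, пентесты."),
--     ("mobile", "Мобильная разработка", "iOS, Android, кроссплатформа."),
--     ("qa", "QA / Тестирование", "Качество, автотесты."),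
--     ("architecture", "Системная архитектура", "Проектирование, масштабирование."),
--     ("product", "Product Management", "Стратегия, приоритеты, метрики."),
--     ("techwriting", "Тех. писатель", "Документация, гайды."),
--     ("embedded", "Embedded / IoT", "Микроконтроллеры, прошивки."),
--     ("gamedev", "Геймдев", "Движки, физика, графика."),
--     ("cloud", "Cloud / Инфра", "Облака, IaC, сервисы."),
--     ("dataeng", "Data Engineering", "Пайплайны, ETL, хранилища."),
-- ]
--
-- QUESTIONS = [
--     {"t": "Мне нравится разбираться, как что-то работает изнутри, а не просто пользоваться готовым.", "w": {"backend": 2, "devops": 1, "architecture": 2, "embedded": 3, "security": 1, "dataeng": 1}},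
--     {"t": "Я получаю удовольствие, когда интерфейс выглядит идеально до пикселя.", "w": {"frontend": 3, "mobile": 2, "gamedev": 1, "product": 1, "backend": -1}},
--     {"t": "Я могу часами искать одну ошибку и не раздражаюсь.", "w": {"qa": 3, "backend": 1, "security": 2, "embedded": 1, "devops": 1}},
--     {"t": "Мне интересно находить закономерности в больших объёмах данных.", "w": {"datascience": 3, "dataeng": 2, "security": 1, "backend": 1, "architecture": 1}},
--     {"t": "Я люблю объяснять сложные вещи простым языком.", "w": {"techwriting": 3, "product": 2, "qa": 1, "frontend": 1}},
--     {"t": "Меня привлекает идея управлять серверами и инфраструктурой.", "w": {"devops": 3, "cloud": 3, "embedded": 1, "architecture": 1, "backend": 1}},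
--     {"t": "Я думаю о том, как злоумышленник мог бы взломать систему.", "w": {"security": 3, "devops": 1, "architecture": 1, "backend": 1, "qa": 1}},
--     {"t": "Мне нравится создавать то, что люди могут потрогать или увидеть.", "w": {"frontend": 2, "mobile": 3, "gamedev": 2, "embedded": 2, "product": 1}},
--     {"t": "Я предпочитаю работать один и погружаться в задачу.", "w": {"backend": 2, "embedded": 2, "datascience": 1, "architecture": 1, "product": -2, "techwriting": -1}},
--     {"t": "Математика и статистика — мои сильные стороны.", "w": {"datascience": 3, "dataeng": 2, "architecture": 1, "security": 1, "gamedev": 1, "backend": 1}},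
--     {"t": "Мне нравится автоматизировать рутинные процессы.", "w": {"devops": 3, "dataeng": 2, "backend": 2, "qa": 2, "cloud": 1}},
--     {"t": "Я интересуюсь трендами в дизайне и UX.", "w": {"frontend": 3, "mobile": 2, "product": 2, "gamedev": 1, "techwriting": 1}},
--     {"t": "Мне важно понимать, зачем продукт нужен пользователю.", "w": {"product": 3, "frontend": 1, "mobile": 1, "techwriting": 1, "qa": 1, "architecture": 1}},
--     {"t": "Мне было бы интересно паять платы или программировать микроконтроллеры.", "w": {"embedded": 3, "gamedev": 1, "devops": 1, "security": 1}},
--     {"t": "Я умею расставлять приоритеты и управлять ожиданиями.", "w": {"product": 3, "architecture": 2, "techwriting": 1, "qa": 1, "devops": 1}},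
--     {"t": "Мне нравится проектировать системы, даже если я сам их не буду писать.", "w": {"architecture": 3, "backend": 2, "cloud": 2, "devops": 1, "dataeng": 1}},
--     {"t": "Я скорее перфекционист — хочу, чтобы всё работало без сбоев.", "w": {"qa": 2, "devops": 2, "security": 1, "embedded": 1, "backend": 1, "architecture": 1}},
--     {"t": "Мне комфортно общаться с нетехническими людьми.", "w": {"product": 3, "techwriting": 2, "qa": 1, "frontend": 1, "mobile": 1, "backend": -1, "embedded": -1}},
--     {"t": "Я люблю игры и мечтал бы создавать свои.", "w": {"gamedev": 3, "frontend": 1, "mobile": 1, "embedded": 1}},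
--     {"t": "Я готов дежурить ночью, если упал продакшн.", "w": {"devops": 3, "cloud": 2, "backend": 1, "security": 1, "architecture": 1}},
--     {"t": "Я люблю документировать свои решения и процессы.", "w": {"techwriting": 3, "qa": 2, "architecture": 1, "product": 1, "devops": 1}},
--     {"t": "Мне интересно, как устроена работа с большими потоками данных.", "w": {"dataeng": 3, "datascience": 2, "backend": 2, "cloud": 1, "architecture": 1}},
--     {"t": "Я хочу видеть результат своей работы на экране телефона.", "w": {"mobile": 3, "frontend": 2, "gamedev": 1, "product": 1}},
--     {"t": "Я хорошо замечаю баги, несоответствия и мелкие детали.", "w": {"qa": 3, "security": 2, "frontend": 1, "techwriting": 1}},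
--     {"t": "Мне нравится оптимизировать код так, чтобы он работал быстрее.", "w": {"backend": 3, "embedded": 2, "gamedev": 2, "architecture": 1, "dataeng": 1}},
--     {"t": "Я слежу за новостями об облачных технологиях (AWS, GCP, Azure).", "w": {"cloud": 3, "devops": 2, "architecture": 1, "dataeng": 1, "backend": 1}},
--     {"t": "Мне важнее надёжность системы, чем скорость разработки.", "w": {"security": 2, "qa": 2, "devops": 1, "architecture": 2, "embedded": 1, "cloud": 1, "product": -1}},
--     {"t": "Я хотел бы принимать стратегические решения о развитии продукта.", "w": {"product": 3, "architecture": 2, "techwriting": 1, "frontend": 1, "datascience": 1}},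
-- ]
--
-- def _calc_results(answers: list[int]) -> list[tuple[str, str, str, int]]:
--     raw = {}
--     max_p = {}
--     min_p = {}
--     for sid, name, desc in SPECS:
--         raw[sid] = 0
--         max_p[sid] = 0
--         min_p[sid] = 0
--     for qi, a in enumerate(answers):
--         val = a if a else 3
--         for sid, w in QUESTIONS[qi]["w"].items():
--             raw[sid] += val * w
--             if w > 0:
--                 max_p[sid] += 5 * w
--             else:
--                 min_p[sid] += 5 * w
--     results = []
--     for sid, name, desc in SPECS:
--         rng = max_p[sid] - min_p[sid]
--         pct = round((raw[sid] - min_p[sid]) / rng * 100) if rng > 0 else 50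
--         pct = max(0, min(100, pct))
--         results.append((sid, name, desc, pct))
--     results.sort(key=lambda x: -x[3])
--     return results
-- ===== SOURCE B (Python) =====
-- # B: scores each specialization against its dense 28-entry weight vector
-- # (the transposed, zero-filled view of the weights scattered over QUESTIONS;
-- # B never needs the question texts), zipping the vector with the answers,
-- # instead of scattering every answer into three dicts keyed by spec id.
--
-- SPECS = [
--     ("backend", "Backend-разработка", "Серверная логика, API, базы данных."),
--     ("frontend", "Frontend-разработка", "Интерфейсы, анимации, UX."),
--     ("devops", "DevOps / SRE", "CI/CD, мониторинг, автоматизация."),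
--     ("datascience", "Data Science / ML", "Модели, эксперименты, инсайты из данных."),
--     ("security", "Инфобезопасность", "Защита систем, пентесты."),
--     ("mobile", "Мобильная разработка", "iOS, Android, кроссплатформа."),
--     ("qa", "QA / Тестирование", "Качество, автотесты."),
--     ("architecture", "Системная архитектура", "Проектирование, масштабирование."),
--     ("product", "Product Management", "Стратегия, приоритеты, метрики."),
--     ("techwriting", "Тех. писатель", "Документация, гайды."),
--     ("embedded", "Embedded / IoT", "Микроконтроллеры, прошивки."),
--     ("gamedev", "Геймдев", "Движки, физика, графика."),
--     ("cloud", "Cloud / Инфра", "Облака, IaC, сервисы."),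
--     ("dataeng", "Data Engineering", "Пайплайны, ETL, хранилища."),
-- ]
--
-- # weight of question qi for spec sid is W_VECTORS[sid][qi] (0 = not weighted)
-- W_VECTORS = {
--     'backend': [2, -1, 1, 1, 0, 1, 1, 0, 2, 1, 2, 0, 0, 0, 0, 2, 1, -1, 0, 1, 0, 2, 0, 0, 3, 1, 0, 0],
--     'frontend': [0, 3, 0, 0, 1, 0, 0, 2, 0, 0, 0, 3, 1, 0, 0, 0, 0, 1, 1, 0, 0, 0, 2, 1, 0, 0, 0, 1],
--     'devops': [1, 0, 1, 0, 0, 3, 1, 0, 0, 0, 3, 0, 0, 1, 1, 1, 2, 0, 0, 3, 1, 0, 0, 0, 0, 2, 1, 0],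
--     'datascience': [0, 0, 0, 3, 0, 0, 0, 0, 1, 3, 0, 0, 0, 0, 0, 0, 0, 0, 0, 0, 0, 2, 0, 0, 0, 0, 0, 1],
--     'security': [1, 0, 2, 1, 0, 0, 3, 0, 0, 1, 0, 0, 0, 1, 0, 0, 1, 0, 0, 1, 0, 0, 0, 2, 0, 0, 2, 0],
--     'mobile': [0, 2, 0, 0, 0, 0, 0, 3, 0, 0, 0, 2, 1, 0, 0, 0, 0, 1, 1, 0, 0, 0, 3, 0, 0, 0, 0, 0],
--     'qa': [0, 0, 3, 0, 1, 0, 1, 0, 0, 0, 2, 0, 1, 0, 1, 0, 2, 1, 0, 0, 2, 0, 0, 3, 0, 0, 2, 0],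
--     'architecture': [2, 0, 0, 1, 0, 1, 1, 0, 1, 1, 0, 0, 1, 0, 2, 3, 1, 0, 0, 1, 1, 1, 0, 0, 1, 1, 2, 2],
--     'product': [0, 1, 0, 0, 2, 0, 0, 1, -2, 0, 0, 2, 3, 0, 3, 0, 0, 3, 0, 0, 1, 0, 1, 0, 0, 0, -1, 3],
--     'techwriting': [0, 0, 0, 0, 3, 0, 0, 0, -1, 0, 0, 1, 1, 0, 1, 0, 0, 2, 0, 0, 3, 0, 0, 1, 0, 0, 0, 1],
--     'embedded': [3, 0, 1, 0, 0, 1, 0, 2, 2, 0, 0, 0, 0, 3, 0, 0, 1, -1, 1, 0, 0, 0, 0, 0, 2, 0, 1, 0],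
--     'gamedev': [0, 1, 0, 0, 0, 0, 0, 2, 0, 1, 0, 1, 0, 1, 0, 0, 0, 0, 3, 0, 0, 0, 1, 0, 2, 0, 0, 0],
--     'cloud': [0, 0, 0, 0, 0, 3, 0, 0, 0, 0, 1, 0, 0, 0, 0, 2, 0, 0, 0, 2, 0, 1, 0, 0, 0, 3, 1, 0],
--     'dataeng': [1, 0, 0, 2, 0, 0, 0, 0, 0, 2, 2, 0, 0, 0, 0, 1, 0, 0, 0, 0, 0, 3, 0, 0, 1, 1, 0, 0],
-- }
--
--
-- def _calc_results(answers: list[int]) -> list[tuple[str, str, str, int]]: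
--     results = []
--     for sid, name, desc in SPECS:
--         raw = hi = lo = 0
--         for a, w in zip(answers, W_VECTORS[sid]):
--             raw += (a if a else 3) * w
--             if w > 0:
--                 hi += 5 * w
--             else:
--                 lo += 5 * w
--         span = hi - lo
--         pct = round((raw - lo) / span * 100) if span > 0 else 50
--         results.append((sid, name, desc, max(0, min(100, pct))))
--     results.sort(key=lambda x: x[3], reverse=True)
--     return results
-- ===== Notes on version B (the rewrite author's own statement) =====
-- stated objective: alternative
-- what changed: B replaces A's scatter phase (three dicts keyed by spec id, filled while looping over answers and each question's weight dict, then read back per spec) with a gather over dense transposed weight vectors (spec id -> 28 weights, 0 = unweighted): per spec one zip(answers, vector) accumulation with no dict updates and no membership test, percentage computed inline, sorted with reverse=True instead of a negated key.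
import Mathlib
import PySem

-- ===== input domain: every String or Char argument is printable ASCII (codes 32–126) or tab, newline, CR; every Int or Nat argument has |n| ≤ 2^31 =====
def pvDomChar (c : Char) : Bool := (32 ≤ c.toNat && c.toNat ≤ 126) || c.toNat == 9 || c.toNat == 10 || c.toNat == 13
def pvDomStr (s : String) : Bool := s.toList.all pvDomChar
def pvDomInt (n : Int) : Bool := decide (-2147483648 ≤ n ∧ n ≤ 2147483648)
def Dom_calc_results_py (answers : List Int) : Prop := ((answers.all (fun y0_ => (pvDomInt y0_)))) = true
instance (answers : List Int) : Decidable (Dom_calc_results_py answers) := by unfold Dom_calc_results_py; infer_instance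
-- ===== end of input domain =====

-- B scores each spec against its dense transposed 28-entry weight vector via zip(answers, vector)
-- instead of scattering every answer into three dicts keyed by spec id (objective: alternative).

-- ===== PORT A =====
-- SPECS (module constant)
def pvSpecs : List (String × String × String) := [
  ("backend", "Backend-разработка", "Серверная логика, API, базы данных."),
  ("frontend", "Frontend-разработка", "Интерфейсы, анимации, UX."),
  ("devops", "DevOps / SRE", "CI/CD, мониторинг, автоматизация."),
  ("datascience", "Data Science / ML", "Модели, эксперименты, инсайты из данных."),
  ("security", "Инфобезопасность", "Защита систем, пентесты."),
  ("mobile", "Мобильная разработка", "iOS, Android, кроссплатформа."),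
  ("qa", "QA / Тестирование", "Качество, автотесты."),
  ("architecture", "Системная архитектура", "Проектирование, масштабирование."),
  ("product", "Product Management", "Стратегия, приоритеты, метрики."),
  ("techwriting", "Тех. писатель", "Документация, гайды."),
  ("embedded", "Embedded / IoT", "Микроконтроллеры, прошивки."),
  ("gamedev", "Геймдев", "Движки, физика, графика."),
  ("cloud", "Cloud / Инфра", "Облака, IaC, сервисы."),
  ("dataeng", "Data Engineering", "Пайплайны, ETL, хранилища.")]

-- QUESTIONS (module constant): only the "w" dict of each question is read by _calc_results,
-- so each question is represented by its weight dict as an insertion-ordered association list.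
def pvQW : List (List (String × Int)) := [
  [("backend", 2), ("devops", 1), ("architecture", 2), ("embedded", 3), ("security", 1), ("dataeng", 1)],
  [("frontend", 3), ("mobile", 2), ("gamedev", 1), ("product", 1), ("backend", -1)],
  [("qa", 3), ("backend", 1), ("security", 2), ("embedded", 1), ("devops", 1)],
  [("datascience", 3), ("dataeng", 2), ("security", 1), ("backend", 1), ("architecture", 1)],
  [("techwriting", 3), ("product", 2), ("qa", 1), ("frontend", 1)],
  [("devops", 3), ("cloud", 3), ("embedded", 1), ("architecture", 1), ("backend", 1)],
  [("security", 3), ("devops", 1), ("architecture", 1), ("backend", 1), ("qa", 1)],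
  [("frontend", 2), ("mobile", 3), ("gamedev", 2), ("embedded", 2), ("product", 1)],
  [("backend", 2), ("embedded", 2), ("datascience", 1), ("architecture", 1), ("product", -2), ("techwriting", -1)],
  [("datascience", 3), ("dataeng", 2), ("architecture", 1), ("security", 1), ("gamedev", 1), ("backend", 1)],
  [("devops", 3), ("dataeng", 2), ("backend", 2), ("qa", 2), ("cloud", 1)],
  [("frontend", 3), ("mobile", 2), ("product", 2), ("gamedev", 1), ("techwriting", 1)],
  [("product", 3), ("frontend", 1), ("mobile", 1), ("techwriting", 1), ("qa", 1), ("architecture", 1)],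
  [("embedded", 3), ("gamedev", 1), ("devops", 1), ("security", 1)],
  [("product", 3), ("architecture", 2), ("techwriting", 1), ("qa", 1), ("devops", 1)],
  [("architecture", 3), ("backend", 2), ("cloud", 2), ("devops", 1), ("dataeng", 1)],
  [("qa", 2), ("devops", 2), ("security", 1), ("embedded", 1), ("backend", 1), ("architecture", 1)],
  [("product", 3), ("techwriting", 2), ("qa", 1), ("frontend", 1), ("mobile", 1), ("backend", -1), ("embedded", -1)],
  [("gamedev", 3), ("frontend", 1), ("mobile", 1), ("embedded", 1)],
  [("devops", 3), ("cloud", 2), ("backend", 1), ("security", 1), ("architecture", 1)],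
  [("techwriting", 3), ("qa", 2), ("architecture", 1), ("product", 1), ("devops", 1)],
  [("dataeng", 3), ("datascience", 2), ("backend", 2), ("cloud", 1), ("architecture", 1)],
  [("mobile", 3), ("frontend", 2), ("gamedev", 1), ("product", 1)],
  [("qa", 3), ("security", 2), ("frontend", 1), ("techwriting", 1)],
  [("backend", 3), ("embedded", 2), ("gamedev", 2), ("architecture", 1), ("dataeng", 1)],
  [("cloud", 3), ("devops", 2), ("architecture", 1), ("dataeng", 1), ("backend", 1)],
  [("security", 2), ("qa", 2), ("devops", 1), ("architecture", 2), ("embedded", 1), ("cloud", 1), ("product", -1)],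
  [("product", 3), ("architecture", 2), ("techwriting", 1), ("frontend", 1), ("datascience", 1)]]

-- Exact integer model of Python's round(m / r * 100) for r > 0 (true division to the nearest
-- double, multiplication by 100 rounded to the nearest double, then round half-to-even);
-- exact for |m| < 2^53 / 2^9, which covers every value reachable under Dom_calc_results_py.
-- Shared by both ports: A and B spell the percentage expression identically.
def pvRoundEven (n d : Int) : Int :=
  let q := PySem.Int.floordiv n d
  let r2 := 2 * (n - q * d)
  if r2 < d then q else if r2 > d then q + 1 else if q % 2 = 0 then q else q + 1

def pvBits (n : Int) : Int := (Nat.size n.toNat : Int)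

-- mantissa of m/(r*2^e) rounded to nearest-even
def pvNorm (m r e : Int) : Int :=
  if 0 ≤ e then pvRoundEven m (r * 2 ^ e.toNat) else pvRoundEven (m * 2 ^ (-e).toNat) r

def pvRound100Pos (m r : Int) : Int :=
  let e0 := pvBits m - pvBits r - 53
  let a0 := pvNorm m r e0
  let p : Int × Int :=
    if a0 ≥ 2 ^ 53 then (pvNorm m r (e0 + 1), e0 + 1)
    else if a0 < 2 ^ 52 then (pvNorm m r (e0 - 1), e0 - 1) else (a0, e0)
  let p := if p.1 = 2 ^ 53 then ((2 ^ 52 : Int), p.2 + 1) else p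
  let n := p.1 * 100
  let s := pvBits n - 53
  let a2 := pvRoundEven n (2 ^ s.toNat)
  let e2 := p.2 + s
  let p2 : Int × Int := if a2 = 2 ^ 53 then ((2 ^ 52 : Int), e2 + 1) else (a2, e2)
  if 0 ≤ p2.2 then p2.1 * 2 ^ p2.2.toNat else pvRoundEven p2.1 (2 ^ (-p2.2).toNat)

-- round(m / r * 100) for r > 0
def pvPyRound100Div (m r : Int) : Int :=
  if m = 0 then 0 else if m < 0 then -(pvRound100Pos (-m) r) else pvRound100Pos m r

abbrev PvD := PySem.Dict String Int

-- one (sid, w) item of QUESTIONS[qi]["w"].items(): raw[sid] += val*w; max_p/min_p by sign of w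
def pvStepA (val : Int) (t : PvD × PvD × PvD) (p : String × Int) : PvD × PvD × PvD :=
  (t.1.insert p.1 (t.1.getD p.1 0 + val * p.2),
   if p.2 > 0 then t.2.1.insert p.1 (t.2.1.getD p.1 0 + 5 * p.2) else t.2.1,
   if p.2 > 0 then t.2.2 else t.2.2.insert p.1 (t.2.2.getD p.1 0 + 5 * p.2))

def calc_results_py (answers : List Int) : List (String × String × String × Int) :=
  let init : PvD × PvD × PvD :=
    pvSpecs.foldl (fun t s => (t.1.insert s.1 0, t.2.1.insert s.1 0, t.2.2.insert s.1 0))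
      (PySem.Dict.empty, PySem.Dict.empty, PySem.Dict.empty)
  let st := (PySem.List.enumerate answers).foldl (fun t qa =>
      let val := if qa.2 ≠ 0 then qa.2 else 3
      (PySem.List.pyGetD pvQW qa.1 []).foldl (pvStepA val) t) init
  let results := pvSpecs.map (fun s =>
      let rng := st.2.1.getD s.1 0 - st.2.2.getD s.1 0
      let pct := if rng > 0 then pvPyRound100Div (st.1.getD s.1 0 - st.2.2.getD s.1 0) rng else 50
      (s.1, s.2.1, s.2.2, max 0 (min 100 pct)))
  PySem.List.sorted results (fun x => -x.2.2.2) false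

-- ===== PORT B =====
-- W_VECTORS (module constant of Source B): dense 28-entry weight vector per spec id,
-- a dict spec id -> list of weights indexed by question number (0 = not weighted).
def pvWVec : PySem.Dict String (List Int) := PySem.Dict.mk [
  ("backend", [2, -1, 1, 1, 0, 1, 1, 0, 2, 1, 2, 0, 0, 0, 0, 2, 1, -1, 0, 1, 0, 2, 0, 0, 3, 1, 0, 0]),
  ("frontend", [0, 3, 0, 0, 1, 0, 0, 2, 0, 0, 0, 3, 1, 0, 0, 0, 0, 1, 1, 0, 0, 0, 2, 1, 0, 0, 0, 1]),
  ("devops", [1, 0, 1, 0, 0, 3, 1, 0, 0, 0, 3, 0, 0, 1, 1, 1, 2, 0, 0, 3, 1, 0, 0, 0, 0, 2, 1, 0]),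
  ("datascience", [0, 0, 0, 3, 0, 0, 0, 0, 1, 3, 0, 0, 0, 0, 0, 0, 0, 0, 0, 0, 0, 2, 0, 0, 0, 0, 0, 1]),
  ("security", [1, 0, 2, 1, 0, 0, 3, 0, 0, 1, 0, 0, 0, 1, 0, 0, 1, 0, 0, 1, 0, 0, 0, 2, 0, 0, 2, 0]),
  ("mobile", [0, 2, 0, 0, 0, 0, 0, 3, 0, 0, 0, 2, 1, 0, 0, 0, 0, 1, 1, 0, 0, 0, 3, 0, 0, 0, 0, 0]),
  ("qa", [0, 0, 3, 0, 1, 0, 1, 0, 0, 0, 2, 0, 1, 0, 1, 0, 2, 1, 0, 0, 2, 0, 0, 3, 0, 0, 2, 0]),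
  ("architecture", [2, 0, 0, 1, 0, 1, 1, 0, 1, 1, 0, 0, 1, 0, 2, 3, 1, 0, 0, 1, 1, 1, 0, 0, 1, 1, 2, 2]),
  ("product", [0, 1, 0, 0, 2, 0, 0, 1, -2, 0, 0, 2, 3, 0, 3, 0, 0, 3, 0, 0, 1, 0, 1, 0, 0, 0, -1, 3]),
  ("techwriting", [0, 0, 0, 0, 3, 0, 0, 0, -1, 0, 0, 1, 1, 0, 1, 0, 0, 2, 0, 0, 3, 0, 0, 1, 0, 0, 0, 1]),
  ("embedded", [3, 0, 1, 0, 0, 1, 0, 2, 2, 0, 0, 0, 0, 3, 0, 0, 1, -1, 1, 0, 0, 0, 0, 0, 2, 0, 1, 0]),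
  ("gamedev", [0, 1, 0, 0, 0, 0, 0, 2, 0, 1, 0, 1, 0, 1, 0, 0, 0, 0, 3, 0, 0, 0, 1, 0, 2, 0, 0, 0]),
  ("cloud", [0, 0, 0, 0, 0, 3, 0, 0, 0, 0, 1, 0, 0, 0, 0, 2, 0, 0, 0, 2, 0, 1, 0, 0, 0, 3, 1, 0]),
  ("dataeng", [1, 0, 0, 2, 0, 0, 0, 0, 0, 2, 2, 0, 0, 0, 0, 1, 0, 0, 0, 0, 0, 3, 0, 0, 1, 1, 0, 0])]

-- the body of B's inner loop over zip(answers, W_VECTORS[sid]): accumulate (raw, hi, lo)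
def pvBlend (acc : Int × Int × Int) (p : Int × Int) : Int × Int × Int :=
  (acc.1 + (if p.1 ≠ 0 then p.1 else 3) * p.2,
   if p.2 > 0 then acc.2.1 + 5 * p.2 else acc.2.1,
   if p.2 > 0 then acc.2.2 else acc.2.2 + 5 * p.2)

def calc_results_py_alt (answers : List Int) : List (String × String × String × Int) :=
  let results := pvSpecs.map (fun s =>
      let t := (answers.zip (pvWVec.getD s.1 [])).foldl pvBlend (0, 0, 0)
      let span := t.2.1 - t.2.2
      let pct := if span > 0 then pvPyRound100Div (t.1 - t.2.2) span else 50
      (s.1, s.2.1, s.2.2, max 0 (min 100 pct)))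
  PySem.List.sorted results (fun x => x.2.2.2) true

-- ===== PRECONDITION & SPEC =====
-- Pre_ excludes exactly the inputs where Python A raises IndexError (QUESTIONS has 28 entries):
-- on longer answer lists A indexes QUESTIONS[qi] out of range (B just ignores the extra answers).
def Pre_calc_results_py (answers : List Int) : Prop := answers.length ≤ 28
instance (answers : List Int) : Decidable (Pre_calc_results_py answers) := by unfold Pre_calc_results_py; infer_instance
def pvWitness_calc_results_py : List Int := [1, 0, -2, 5]

def Spec_calc_results_py (answers : List Int) (out : List (String × String × String × Int)) : Prop := out = calc_results_py_alt answers
instance (answers : List Int) (out : List (String × String × String × Int)) : Decidable (Spec_calc_results_py answers out) := by unfold Spec_calc_results_py; infer_instance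

-- ===== CLAIM (what is proved, stated in full; the proofs are below) =====
def Claim_equal_calc_results_py : Prop := ∀ (answers : List Int), Dom_calc_results_py answers → Pre_calc_results_py answers → Spec_calc_results_py answers (calc_results_py answers)

-- ===== LEMMAS AND PROOFS =====

-- proof-side gather helper: the per-(question,answer) contribution seen through QUESTIONS
def pvWGet (ws : List (String × Int)) (sid : String) : Option Int :=
  (ws.find? (fun p => p.1 == sid)).map (fun p => p.2)

def pvStepB (sid : String) (t : Int × Int × Int) (qa : Int × Int) : Int × Int × Int :=
  match pvWGet (PySem.List.pyGetD pvQW qa.1 []) sid with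
  | none => t
  | some w =>
      (t.1 + (if qa.2 ≠ 0 then qa.2 else 3) * w,
       if w > 0 then t.2.1 + 5 * w else t.2.1,
       if w > 0 then t.2.2 else t.2.2 + 5 * w)

theorem pvWGet_eq_none (sid : String) (ps : List (String × Int)) (h : sid ∉ ps.map Prod.fst) :
    pvWGet ps sid = none := by
  unfold pvWGet
  rw [List.find?_eq_none.mpr]
  · rfl
  · intro p hp
    simp only [beq_iff_eq]
    intro hps
    exact h (by simpa [hps] using List.mem_map_of_mem (f := Prod.fst) hp)

theorem pv_getD_mem {α : Type} (l : List α) (i : Int) (d : α) :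
    PySem.List.pyGetD l i d = d ∨ PySem.List.pyGetD l i d ∈ l := by
  simp only [PySem.List.pyGetD]
  cases h : PySem.List.pyGet? l i with
  | none => simp
  | some x =>
    right
    simp only [Option.getD_some]
    simp only [PySem.List.pyGet?, PySem.List.pyIdx?] at h
    repeat' split at h
    all_goals first | exact List.mem_of_getElem? h | simp_all

theorem pvQW_nodup : ∀ ws ∈ pvQW, (ws.map Prod.fst).Nodup := by decide

theorem pv_inner (sid : String) (val : Int) :
    ∀ (ps : List (String × Int)) (t : PvD × PvD × PvD),
      (ps.map Prod.fst).Nodup →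
      ((ps.foldl (pvStepA val) t).1.getD sid 0 =
         t.1.getD sid 0 + (match pvWGet ps sid with | none => 0 | some w => val * w)) ∧
      ((ps.foldl (pvStepA val) t).2.1.getD sid 0 =
         t.2.1.getD sid 0 + (match pvWGet ps sid with | none => 0 | some w => if w > 0 then 5 * w else 0)) ∧
      ((ps.foldl (pvStepA val) t).2.2.getD sid 0 =
         t.2.2.getD sid 0 + (match pvWGet ps sid with | none => 0 | some w => if w > 0 then 0 else 5 * w)) := by
  intro ps
  induction ps with
  | nil => intro t _; simp [pvWGet]
  | cons p ps ih =>
    intro t hnd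
    simp only [List.map_cons, List.nodup_cons] at hnd
    obtain ⟨hp, hnd⟩ := hnd
    rw [List.foldl_cons]
    obtain ⟨h1, h2, h3⟩ := ih (pvStepA val t p) hnd
    by_cases hps : p.1 = sid
    · have hz : pvWGet ps sid = none := pvWGet_eq_none sid ps (hps ▸ hp)
      rw [hz] at h1 h2 h3
      have hw : pvWGet (p :: ps) sid = some p.2 := by
        simp [pvWGet, hps]
      rw [hw, h1, h2, h3]
      simp only [pvStepA]
      refine ⟨?_, ?_, ?_⟩
      · simp [hps]
      · split_ifs <;> simp [hps]
      · split_ifs <;> simp [hps]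
    · have hps' : sid ≠ p.1 := fun hh => hps hh.symm
      have hw : pvWGet (p :: ps) sid = pvWGet ps sid := by
        simp [pvWGet, hps]
      rw [hw, h1, h2, h3]
      simp only [pvStepA]
      refine ⟨?_, ?_, ?_⟩
      · simp [PySem.Dict.getD_insert, hps']
      · split_ifs with hgt <;> simp [PySem.Dict.getD_insert, hps']
      · split_ifs with hgt <;> simp [PySem.Dict.getD_insert, hps']

theorem pv_outer (sid : String) :
    ∀ (ans : List Int) (s : Int) (t : PvD × PvD × PvD) (u : Int × Int × Int),
      t.1.getD sid 0 = u.1 → t.2.1.getD sid 0 = u.2.1 → t.2.2.getD sid 0 = u.2.2 →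
      (let st := (PySem.List.enumerate ans s).foldl (fun t qa =>
          let val := if qa.2 ≠ 0 then qa.2 else 3
          (PySem.List.pyGetD pvQW qa.1 []).foldl (pvStepA val) t) t
       let u' := (PySem.List.enumerate ans s).foldl (pvStepB sid) u
       st.1.getD sid 0 = u'.1 ∧ st.2.1.getD sid 0 = u'.2.1 ∧ st.2.2.getD sid 0 = u'.2.2) := by
  intro ans
  induction ans with
  | nil => intro s t u h1 h2 h3; simpa [PySem.List.enumerate_nil] using ⟨h1, h2, h3⟩
  | cons a rest ih =>
    intro s t u h1 h2 h3
    simp only [PySem.List.enumerate_cons, List.foldl_cons]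
    set val := if a ≠ 0 then a else 3 with hval
    have hnd : ((PySem.List.pyGetD pvQW s []).map Prod.fst).Nodup := by
      rcases pv_getD_mem pvQW s [] with h | h
      · rw [h]; exact List.nodup_nil
      · exact pvQW_nodup _ h
    obtain ⟨g1, g2, g3⟩ := pv_inner sid val (PySem.List.pyGetD pvQW s []) t hnd
    cases hw : pvWGet (PySem.List.pyGetD pvQW s []) sid with
    | none =>
      rw [hw] at g1 g2 g3
      simp only [add_zero] at g1 g2 g3
      refine ih (s + 1) _ _ ?_ ?_ ?_ <;> simp only [pvStepB, hw] <;>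
        [rw [g1, h1]; rw [g2, h2]; rw [g3, h3]]
    | some w =>
      rw [hw] at g1 g2 g3
      simp only [] at g1 g2 g3
      refine ih (s + 1) _ _ ?_ ?_ ?_ <;> simp only [pvStepB, hw]
      · rw [g1, h1]
      · rw [g2, h2]; split_ifs <;> first | rfl | omega
      · rw [g3, h3]; split_ifs <;> first | rfl | omega

theorem pv_init_zero :
    ∀ (l : List (String × String × String)) (t : PvD × PvD × PvD),
      (∀ x, t.1.getD x 0 = 0 ∧ t.2.1.getD x 0 = 0 ∧ t.2.2.getD x 0 = 0) →
      ∀ x, ((l.foldl (fun t s => (t.1.insert s.1 0, t.2.1.insert s.1 0, t.2.2.insert s.1 0)) t).1.getD x 0 = 0 ∧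
            (l.foldl (fun t s => (t.1.insert s.1 0, t.2.1.insert s.1 0, t.2.2.insert s.1 0)) t).2.1.getD x 0 = 0 ∧
            (l.foldl (fun t s => (t.1.insert s.1 0, t.2.1.insert s.1 0, t.2.2.insert s.1 0)) t).2.2.getD x 0 = 0) := by
  intro l
  induction l with
  | nil => intro t h x; exact h x
  | cons p l ih =>
    intro t h x
    rw [List.foldl_cons]
    refine ih _ ?_ x
    intro y
    obtain ⟨a1, a2, a3⟩ := h y
    refine ⟨?_, ?_, ?_⟩ <;> simp [PySem.Dict.getD_insert, a1, a2, a3]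

-- the dense vector IS the zero-filled per-spec view of QUESTIONS' weights
theorem pv_vec_char : ∀ s ∈ pvSpecs, pvWVec.getD s.1 [] =
    (PySem.List.pyRange 0 28 1).map
      (fun qi => (pvWGet (PySem.List.pyGetD pvQW qi []) s.1).getD 0) := by
  decide

-- zipping a list with a mapped index range is mapping over its enumeration
theorem pv_zip_enum (f : Int → Int) :
    ∀ (ans : List Int) (s : Int), 0 ≤ s → s + ans.length ≤ 28 →
      ans.zip ((PySem.List.pyRange s 28 1).map f) =
        (PySem.List.enumerate ans s).map (fun p => (p.2, f p.1)) := by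
  intro ans
  induction ans with
  | nil => intro s _ _; simp [PySem.List.enumerate_nil]
  | cons a rest ih =>
    intro s hs hlen
    have hs28 : s < 28 := by
      simp only [List.length_cons] at hlen
      omega
    rw [PySem.List.pyRange_one_cons hs28, List.map_cons, List.zip_cons_cons,
        PySem.List.enumerate_cons, List.map_cons]
    congr 1
    exact ih (s + 1) (by omega) (by simp only [List.length_cons] at hlen; push_cast at hlen ⊢; omega)

-- B's blend step applied to (answer, dense weight) is the gather step through QUESTIONS
theorem pv_fold_blend (sid : String) :
    ∀ (l : List (Int × Int)) (t : Int × Int × Int),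
      l.foldl (fun acc p => pvBlend acc (p.2, (pvWGet (PySem.List.pyGetD pvQW p.1 []) sid).getD 0)) t =
        l.foldl (pvStepB sid) t := by
  intro l
  induction l with
  | nil => intro t; rfl
  | cons p ps ih =>
    intro t
    rw [List.foldl_cons, List.foldl_cons, ih]
    congr 1
    cases hw : pvWGet (PySem.List.pyGetD pvQW p.1 []) sid with
    | none => simp [pvBlend, pvStepB, hw]
    | some w => simp [pvBlend, pvStepB, hw]

-- per spec: A's gathered triple equals B's zip fold
theorem pv_triple_eq (sid : String) (hs : sid ∈ pvSpecs.map (fun s => s.1))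
    (answers : List Int) (hlen : answers.length ≤ 28) :
    (PySem.List.enumerate answers).foldl (pvStepB sid) (0, 0, 0) =
      (answers.zip (pvWVec.getD sid [])).foldl pvBlend (0, 0, 0) := by
  obtain ⟨s, hsmem, rfl⟩ := List.mem_map.mp hs
  rw [pv_vec_char s hsmem,
      pv_zip_enum (fun qi => (pvWGet (PySem.List.pyGetD pvQW qi []) s.1).getD 0)
        answers 0 le_rfl (by omega),
      List.foldl_map, pv_fold_blend]

-- ===== VERDICT (by name: the statement is the Claim_ definition above) =====
theorem calc_results_py_spec : Claim_equal_calc_results_py := by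
  intro answers _ hpre
  show calc_results_py answers = calc_results_py_alt answers
  unfold calc_results_py calc_results_py_alt
  dsimp only
  have hkey : (fun (a b : String × String × String × Int) => decide (-a.2.2.2 < -b.2.2.2)) =
      (fun (a b : String × String × String × Int) => decide (b.2.2.2 < a.2.2.2)) := by
    funext a b
    simp [neg_lt_neg_iff]
  rw [PySem.List.sorted_eq_foldl_insertBy, PySem.List.sorted_rev_eq_foldl_insertBy, hkey]
  congr 1
  apply List.map_congr_left
  intro s hsmem
  dsimp only
  have hz := pv_init_zero pvSpecs (PySem.Dict.empty, PySem.Dict.empty, PySem.Dict.empty)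
    (fun x => ⟨PySem.Dict.getD_empty .., PySem.Dict.getD_empty .., PySem.Dict.getD_empty ..⟩) s.1
  obtain ⟨e1, e2, e3⟩ := pv_outer s.1 answers 0 _ (0, 0, 0) hz.1 hz.2.1 hz.2.2
  have htr := pv_triple_eq s.1 (List.mem_map.mpr ⟨s, hsmem, rfl⟩) answers hpre
  dsimp only at e1 e2 e3
  rw [e1, e2, e3, htr]
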